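-- pv_equiv track=rewrite | github.com/Pykartik102/camcom_task | mario_princess_Que1/princess.py | process
-- ===== SOURCE A (Python) =====
-- def process(matrix):
--     # Initializing variables to store Mario's and Princess's positions.
--     m = [0, 0]
--     p = [0, 0]
--     # matrix to find Mario and Princess.
--     for i, row in enumerate(matrix):
--         for j, col in enumerate(row):
--             if col == 'm':
--                 m = [i, j]
--             elif col == 'p':
--                 p = [i, j]
--
--     # Initializing list to store the moves taken by Mario to rescue the Princess.
--     moves = []
--
--     # Loop until Mario reaches the Princess.
--     while True:
--         # Check Mario's position relative to Princess's position
--         # adding appropriate move to the list.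
--         if m[0] - p[0] < 0:
--             moves.append("DOWN")
--             m[0] += 1
--         elif m[0] - p[0] > 0:
--             moves.append("UP")
--             m[0] -= 1
--         if m[1] - p[1] > 0:
--             moves.append("LEFT")
--             m[1] -= 1
--         elif m[1] - p[1] < 0:
--             moves.append("RIGHT")
--             m[1] += 1
--         # If Mario reaches the princcess location then exit the loop
--         if m == p:
--             break
--     # Return the list of moves taken by Mario to rescue the Princess
--     return moves
-- ===== SOURCE B (Python) =====
-- def process(matrix):
--     m = (0, 0)
--     p = (0, 0)
--     for i, row in enumerate(matrix):
--         for j, col in enumerate(row):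
--             if col == 'm':
--                 m = (i, j)
--             elif col == 'p':
--                 p = (i, j)
--     dr = p[0] - m[0]
--     dc = p[1] - m[1]
--     v = "DOWN" if dr > 0 else "UP"
--     h = "RIGHT" if dc > 0 else "LEFT"
--     a = abs(dr)
--     b = abs(dc)
--     k = min(a, b)
--     return [v, h] * k + [v] * (a - k) + [h] * (b - k)
-- ===== Notes on version B (the rewrite author's own statement) =====
-- stated objective: simpler
-- what changed: Replaces A's step-by-step simulation loop (move Mario one cell per iteration until he reaches the princess) with a closed-form construction: compute the row/column deltas once and build the move list by list repetition (interleaved pairs, then the leftover run).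
import Mathlib
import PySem

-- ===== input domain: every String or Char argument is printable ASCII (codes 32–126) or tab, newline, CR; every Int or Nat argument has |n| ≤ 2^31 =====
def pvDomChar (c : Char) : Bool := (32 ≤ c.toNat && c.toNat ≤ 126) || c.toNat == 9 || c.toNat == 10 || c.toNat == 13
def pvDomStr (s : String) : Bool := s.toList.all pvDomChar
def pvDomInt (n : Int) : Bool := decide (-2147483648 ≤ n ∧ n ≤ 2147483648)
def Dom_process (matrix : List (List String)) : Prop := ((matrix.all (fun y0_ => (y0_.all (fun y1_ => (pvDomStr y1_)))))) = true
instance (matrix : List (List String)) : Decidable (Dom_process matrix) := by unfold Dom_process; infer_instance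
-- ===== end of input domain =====

-- B changes only the move generation: a closed-form list construction instead of A's
-- step-by-step walk; the position scan is the same double loop in both (objective: simpler).

-- ===== PORT A =====
-- the double enumerate scan for 'm' and 'p' (identical code in A and B)
def findMP (matrix : List (List String)) : (Int × Int) × (Int × Int) :=
  (PySem.List.enumerate matrix).foldl
    (fun st ir =>
      (PySem.List.enumerate ir.2).foldl
        (fun st2 jc =>
          if jc.2 = "m" then ((ir.1, jc.1), st2.2)
          else if jc.2 = "p" then (st2.1, (ir.1, jc.1))
          else st2) st)
    ((0, 0), (0, 0))

-- A's 'while True' walk: one iteration = at most one vertical then one horizontal move;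
-- the 'if m == p: break' at the iteration's end is the guard of the next unfolding
-- (and the initial-equal case returns [] exactly as A does). 'fuel' is only a
-- structural-termination guard: process passes |p0-m0|+|p1-m1|, which is always enough.
def loopA (fuel : Nat) (m0 m1 p0 p1 : Int) : List String :=
  match fuel with
  | 0 => []
  | fuel + 1 =>
    if m0 = p0 ∧ m1 = p1 then []
    else
      let s1 := if m0 - p0 < 0 then (["DOWN"], m0 + 1)
                else if m0 - p0 > 0 then (["UP"], m0 - 1)
                else (([] : List String), m0)
      let s2 := if m1 - p1 > 0 then (["LEFT"], m1 - 1)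
                else if m1 - p1 < 0 then (["RIGHT"], m1 + 1)
                else (([] : List String), m1)
      s1.1 ++ s2.1 ++ loopA fuel s1.2 s2.2 p0 p1

def process (matrix : List (List String)) : List String :=
  let mp := findMP matrix
  loopA ((mp.2.1 - mp.1.1).natAbs + (mp.2.2 - mp.1.2).natAbs) mp.1.1 mp.1.2 mp.2.1 mp.2.2

-- ===== PORT B =====
def process_alt (matrix : List (List String)) : List String :=
  let mp := findMP matrix
  let dr := mp.2.1 - mp.1.1
  let dc := mp.2.2 - mp.1.2
  let v := if dr > 0 then "DOWN" else "UP"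
  let h := if dc > 0 then "RIGHT" else "LEFT"
  let a := dr.natAbs
  let b := dc.natAbs
  let k := min a b
  (List.replicate k [v, h]).flatten ++ List.replicate (a - k) v ++ List.replicate (b - k) h

-- ===== PRECONDITION & SPEC =====
def Spec_process (matrix : List (List String)) (out : List String) : Prop := out = process_alt matrix
instance (matrix : List (List String)) (out : List String) : Decidable (Spec_process matrix out) := by unfold Spec_process; infer_instance

-- ===== CLAIM (what is proved, stated in full; the proofs are below) =====
def Claim_equal_process : Prop := ∀ (matrix : List (List String)), Dom_process matrix → Spec_process matrix (process matrix)

-- ===== LEMMAS AND PROOFS =====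

-- B's builder, abstracted over the two direction strings and the Nat distances
def buildN (a b : Nat) (v h : String) : List String :=
  (List.replicate (min a b) [v, h]).flatten ++
    List.replicate (a - min a b) v ++ List.replicate (b - min a b) h

lemma buildN_zero_zero (v h : String) : buildN 0 0 v h = [] := by
  simp [buildN]

lemma buildN_zero_left (b : Nat) (v h : String) : buildN 0 b v h = List.replicate b h := by
  simp [buildN]

lemma buildN_zero_right (a : Nat) (v h : String) : buildN a 0 v h = List.replicate a v := by
  simp [buildN]

lemma buildN_succ_succ (a b : Nat) (v h : String) :
    buildN (a + 1) (b + 1) v h = v :: h :: buildN a b v h := by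
  simp [buildN, Nat.succ_min_succ, List.replicate_succ, Nat.succ_sub_succ]

lemma buildN_succ_left (a : Nat) (v h : String) :
    buildN (a + 1) 0 v h = v :: buildN a 0 v h := by
  simp [buildN_zero_right, List.replicate_succ]

lemma buildN_succ_right (b : Nat) (v h : String) :
    buildN 0 (b + 1) v h = h :: buildN 0 b v h := by
  simp [buildN_zero_left, List.replicate_succ]

lemma buildN_indep (a b : Nat) (v v' h h' : String)
    (h1 : a = 0 ∨ v = v') (h2 : b = 0 ∨ h = h') : buildN a b v h = buildN a b v' h' := by
  rcases h1 with ha | hv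
  · rcases h2 with hb | hh
    · subst ha; subst hb; simp [buildN_zero_zero]
    · subst ha; subst hh; simp [buildN_zero_left]
  · rcases h2 with hb | hh
    · subst hb; subst hv; simp [buildN_zero_right]
    · subst hv; subst hh; rfl

lemma if_dir_le (m p : Int) (a b : String) (h : m ≤ p) :
    (p - m).natAbs = 0 ∨ (if m < p then a else b) = a := by
  rcases eq_or_lt_of_le h with he | hl
  · left; omega
  · right; rw [if_pos hl]

lemma if_dir_ge (m p : Int) (a b : String) (h : p ≤ m) :
    (p - m).natAbs = 0 ∨ (if m < p then a else b) = b := by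
  right; rw [if_neg (not_lt.mpr h)]

lemma loopA_eq_buildN (fuel : Nat) : ∀ m0 m1 p0 p1 : Int,
    (p0 - m0).natAbs + (p1 - m1).natAbs ≤ fuel →
    loopA fuel m0 m1 p0 p1 =
      buildN (p0 - m0).natAbs (p1 - m1).natAbs
        (if m0 < p0 then "DOWN" else "UP") (if m1 < p1 then "RIGHT" else "LEFT") := by
  induction fuel with
  | zero =>
    intro m0 m1 p0 p1 hn
    rw [show (p0 - m0).natAbs = 0 by omega, show (p1 - m1).natAbs = 0 by omega, loopA]
    exact (buildN_zero_zero _ _).symm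
  | succ n IH =>
    intro m0 m1 p0 p1 hn
    rw [loopA]
    split_ifs with h1 h2 h3 h4 h5
    all_goals try (exfalso; omega)
    -- equal: no moves
    · rw [show (p0 - m0).natAbs = 0 by omega, show (p1 - m1).natAbs = 0 by omega]
      exact (buildN_zero_zero _ _).symm
    -- DOWN, LEFT
    · dsimp only [List.cons_append, List.nil_append]
      rw [IH (m0 + 1) (m1 - 1) p0 p1 (by omega),
          show (p0 - m0).natAbs = (p0 - (m0 + 1)).natAbs + 1 by omega,
          show (p1 - m1).natAbs = (p1 - (m1 - 1)).natAbs + 1 by omega,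
          buildN_succ_succ]
      exact congrArg _ (congrArg _
        (buildN_indep _ _ _ _ _ _ (if_dir_le _ _ _ _ (by omega)) (if_dir_ge _ _ _ _ (by omega))))
    -- DOWN, RIGHT
    · dsimp only [List.cons_append, List.nil_append]
      rw [IH (m0 + 1) (m1 + 1) p0 p1 (by omega),
          show (p0 - m0).natAbs = (p0 - (m0 + 1)).natAbs + 1 by omega,
          show (p1 - m1).natAbs = (p1 - (m1 + 1)).natAbs + 1 by omega,
          buildN_succ_succ]
      exact congrArg _ (congrArg _
        (buildN_indep _ _ _ _ _ _ (if_dir_le _ _ _ _ (by omega)) (if_dir_le _ _ _ _ (by omega))))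
    -- DOWN only
    · dsimp only [List.cons_append, List.nil_append, List.append_nil]
      rw [IH (m0 + 1) m1 p0 p1 (by omega),
          show (p0 - m0).natAbs = (p0 - (m0 + 1)).natAbs + 1 by omega,
          show (p1 - m1).natAbs = 0 by omega,
          buildN_succ_left]
      exact congrArg _
        (buildN_indep _ _ _ _ _ _ (if_dir_le _ _ _ _ (by omega)) (Or.inl rfl))
    -- UP, LEFT
    · dsimp only [List.cons_append, List.nil_append]
      rw [IH (m0 - 1) (m1 - 1) p0 p1 (by omega),
          show (p0 - m0).natAbs = (p0 - (m0 - 1)).natAbs + 1 by omega,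
          show (p1 - m1).natAbs = (p1 - (m1 - 1)).natAbs + 1 by omega,
          buildN_succ_succ]
      exact congrArg _ (congrArg _
        (buildN_indep _ _ _ _ _ _ (if_dir_ge _ _ _ _ (by omega)) (if_dir_ge _ _ _ _ (by omega))))
    -- UP, RIGHT
    · dsimp only [List.cons_append, List.nil_append]
      rw [IH (m0 - 1) (m1 + 1) p0 p1 (by omega),
          show (p0 - m0).natAbs = (p0 - (m0 - 1)).natAbs + 1 by omega,
          show (p1 - m1).natAbs = (p1 - (m1 + 1)).natAbs + 1 by omega,
          buildN_succ_succ]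
      exact congrArg _ (congrArg _
        (buildN_indep _ _ _ _ _ _ (if_dir_ge _ _ _ _ (by omega)) (if_dir_le _ _ _ _ (by omega))))
    -- UP only
    · dsimp only [List.cons_append, List.nil_append, List.append_nil]
      rw [IH (m0 - 1) m1 p0 p1 (by omega),
          show (p0 - m0).natAbs = (p0 - (m0 - 1)).natAbs + 1 by omega,
          show (p1 - m1).natAbs = 0 by omega,
          buildN_succ_left]
      exact congrArg _
        (buildN_indep _ _ _ _ _ _ (if_dir_ge _ _ _ _ (by omega)) (Or.inl rfl))
    -- LEFT only
    · dsimp only [List.cons_append, List.nil_append]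
      rw [IH m0 (m1 - 1) p0 p1 (by omega),
          show (p0 - m0).natAbs = 0 by omega,
          show (p1 - m1).natAbs = (p1 - (m1 - 1)).natAbs + 1 by omega,
          buildN_succ_right]
      exact congrArg _
        (buildN_indep _ _ _ _ _ _ (Or.inl rfl) (if_dir_ge _ _ _ _ (by omega)))
    -- RIGHT only
    · dsimp only [List.cons_append, List.nil_append]
      rw [IH m0 (m1 + 1) p0 p1 (by omega),
          show (p0 - m0).natAbs = 0 by omega,
          show (p1 - m1).natAbs = (p1 - (m1 + 1)).natAbs + 1 by omega,
          buildN_succ_right]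
      exact congrArg _
        (buildN_indep _ _ _ _ _ _ (Or.inl rfl) (if_dir_le _ _ _ _ (by omega)))

theorem process_alt_eq (matrix : List (List String)) :
    process matrix = process_alt matrix := by
  unfold process process_alt
  dsimp only
  rw [loopA_eq_buildN ((((findMP matrix).2.1 - (findMP matrix).1.1).natAbs) +
      (((findMP matrix).2.2 - (findMP matrix).1.2).natAbs))
      (findMP matrix).1.1 (findMP matrix).1.2 (findMP matrix).2.1 (findMP matrix).2.2 le_rfl]
  simp only [buildN, gt_iff_lt, Int.sub_pos]

-- ===== VERDICT (by name: the statement is the Claim_ definition above) =====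
theorem process_spec : Claim_equal_process := by
  intro matrix _
  unfold Spec_process
  exact process_alt_eq matrix
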